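-- pv_equiv track=rewrite | github.com/S-SIRIUS/Programmers | 프로그래머스/2/49993. 스킬트리/스킬트리.py | checkSkills
-- ===== SOURCE A (Python) =====
-- def checkSkills(skill, skill_tree):
--     for i in range (0, len(skill)):
--         present = skill_tree.find(skill[i])
--         if present == -1:
--             present = 999
--         if i==0:
--             before = present
--         else:
--             if present >= before:
--                 before = present
--                 continue
--             else:
--                 return 0
--     return 1
-- ===== SOURCE B (Python) =====
-- def checkSkills(skill, skill_tree):
--     def pos(c):
--         p = skill_tree.find(c)
--         return 999 if p == -1 else p
--     positions = [pos(c) for c in skill]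
--     return 1 if positions == sorted(positions) else 0
-- ===== Notes on version B (the rewrite author's own statement) =====
-- stated objective: alternative
-- what changed: B first extracts all find-positions (with -1 mapped to 999) into a list via a comprehension and then decides the answer with a sort-based monotonicity test (positions == sorted(positions)), replacing A's interleaved scan that compares each position to its predecessor with early return.
import Mathlib
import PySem

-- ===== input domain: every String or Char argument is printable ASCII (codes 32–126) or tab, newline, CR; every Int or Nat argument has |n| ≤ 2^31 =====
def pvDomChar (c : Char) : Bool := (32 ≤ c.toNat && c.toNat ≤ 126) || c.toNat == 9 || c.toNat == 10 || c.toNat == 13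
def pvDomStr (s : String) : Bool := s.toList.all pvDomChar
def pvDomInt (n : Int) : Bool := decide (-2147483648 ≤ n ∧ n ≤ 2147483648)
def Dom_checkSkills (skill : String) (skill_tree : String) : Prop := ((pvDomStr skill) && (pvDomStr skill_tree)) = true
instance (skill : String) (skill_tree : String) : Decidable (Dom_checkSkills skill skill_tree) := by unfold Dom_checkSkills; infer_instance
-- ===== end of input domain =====

-- B replaces A's interleaved predecessor-comparison scan by extracting all positions first
-- and testing positions = sorted(positions); alternative decomposition, same cost class.

-- ===== PORT A =====
-- the loop body of A after the i = 0 iteration: `before` is the running state, early return 0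
def checkSkillsLoopA (tree : List Char) : List Char → Int → Int
  | [], _ => 1
  | c :: rest, before =>
    let p := PySem.Chars.find tree [c]
    let present := if p = -1 then 999 else p
    if present ≥ before then checkSkillsLoopA tree rest present else 0

def checkSkills (skill : String) (skill_tree : String) : Int :=
  match skill.toList with
  | [] => 1
  | c :: rest =>
    let p := PySem.Chars.find skill_tree.toList [c]
    let before := if p = -1 then 999 else p
    checkSkillsLoopA skill_tree.toList rest before

-- ===== PORT B =====
def posB (tree : List Char) (c : Char) : Int :=
  let p := PySem.Chars.find tree [c]
  if p = -1 then 999 else p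

def checkSkills_alt (skill : String) (skill_tree : String) : Int :=
  let positions := skill.toList.map (posB skill_tree.toList)
  if positions = PySem.List.sorted positions (fun x => x) false then 1 else 0

-- ===== PRECONDITION & SPEC =====
def Spec_checkSkills (skill : String) (skill_tree : String) (out : Int) : Prop := out = checkSkills_alt skill skill_tree
instance (skill : String) (skill_tree : String) (out : Int) : Decidable (Spec_checkSkills skill skill_tree out) := by unfold Spec_checkSkills; infer_instance

-- ===== CLAIM (what is proved, stated in full; the proofs are below) =====
def Claim_equal_checkSkills : Prop := ∀ (skill : String) (skill_tree : String), Dom_checkSkills skill skill_tree → Spec_checkSkills skill skill_tree (checkSkills skill skill_tree)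

-- ===== LEMMAS AND PROOFS =====

theorem pairwise_cons_cons_le (b p : Int) (ps : List Int) :
    (b :: p :: ps).Pairwise (· ≤ ·) ↔ b ≤ p ∧ (p :: ps).Pairwise (· ≤ ·) := by
  constructor
  · intro h
    rcases List.pairwise_cons.mp h with ⟨hb, ht⟩
    exact ⟨hb p (by simp), ht⟩
  · rintro ⟨hbp, ht⟩
    refine List.pairwise_cons.mpr ⟨?_, ht⟩
    intro x hx
    rcases List.mem_cons.mp hx with rfl | hx
    · exact hbp
    · exact le_trans hbp (List.rel_of_pairwise_cons ht hx)

-- A's loop over the remaining chars equals a pairwise monotonicity test on b :: mapped positions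
theorem loopA_eq_pairwise (tree : List Char) (cs : List Char) (b : Int) :
    checkSkillsLoopA tree cs b =
      if (b :: cs.map (posB tree)).Pairwise (· ≤ ·) then 1 else 0 := by
  induction cs generalizing b with
  | nil => simp [checkSkillsLoopA]
  | cons c rest ih =>
    simp only [checkSkillsLoopA, List.map_cons]
    change (if posB tree c ≥ b then checkSkillsLoopA tree rest (posB tree c) else 0) = _
    rw [ih]
    split_ifs with h1 h2 h3 h3 h3 <;> try rfl
    all_goals first
      | exact absurd ((pairwise_cons_cons_le _ _ _).mpr ⟨h1, h2⟩) h3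
      | exact absurd ((pairwise_cons_cons_le _ _ _).mp h3).2 h2
      | exact absurd ((pairwise_cons_cons_le _ _ _).mp h3).1 h1

theorem sorted_eq_iff_pairwise (ps : List Int) :
    ps = PySem.List.sorted ps (fun x => x) false ↔ ps.Pairwise (· ≤ ·) := by
  constructor
  · intro h
    have hs := PySem.List.sorted_pairwise ps (fun x => x)
    rw [← h] at hs
    exact hs
  · intro h
    exact (PySem.List.sorted_eq_self_of_pairwise ps (fun x => x) h).symm

-- ===== VERDICT (by name: the statement is the Claim_ definition above) =====
theorem checkSkills_spec : Claim_equal_checkSkills := by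
  intro skill skill_tree _
  unfold Spec_checkSkills checkSkills checkSkills_alt
  cases h : skill.toList with
  | nil => simp [PySem.List.sorted]
  | cons c rest =>
    simp only [List.map_cons]
    change checkSkillsLoopA skill_tree.toList rest (posB skill_tree.toList c) = _
    rw [loopA_eq_pairwise]
    by_cases hp : (posB skill_tree.toList c :: rest.map (posB skill_tree.toList)).Pairwise (· ≤ ·)
    · rw [if_pos hp, if_pos ((sorted_eq_iff_pairwise _).mpr hp)]
    · rw [if_neg hp, if_neg (fun he => hp ((sorted_eq_iff_pairwise _).mp he))]
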